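-- pv_equiv track=rewrite | github.com/joshuarocksolid/ChoreBoyCodeStudio | app/run/test_runner_service.py | _normalized_pytest_args
-- ===== SOURCE A (Python) =====
-- _IMPORT_MODE_ARG = "--import-mode=importlib"
--
-- _PYTEST_CACHE_PROVIDER_DISABLE_ARGS = ["-p", "no:cacheprovider"]
--
-- def _normalized_pytest_args(pytest_args: list[str]) -> list[str]:
--     normalized_args = [str(arg) for arg in pytest_args]
--     if _IMPORT_MODE_ARG not in normalized_args:
--         insert_at = len(normalized_args)
--         for index, arg in enumerate(normalized_args):
--             if not arg.startswith("-"):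
--                 insert_at = index
--                 break
--         normalized_args.insert(insert_at, _IMPORT_MODE_ARG)
--     if not _has_cache_provider_override(normalized_args):
--         insert_at = len(normalized_args)
--         for index, arg in enumerate(normalized_args):
--             if not arg.startswith("-"):
--                 insert_at = index
--                 break
--         normalized_args[insert_at:insert_at] = list(_PYTEST_CACHE_PROVIDER_DISABLE_ARGS)
--     return normalized_args
--
-- def _has_cache_provider_override(pytest_args: list[str]) -> bool:
--     for index, arg in enumerate(pytest_args):
--         if arg == "-p" and index + 1 < len(pytest_args) and pytest_args[index + 1] == "no:cacheprovider":
--             return True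
--     return False
-- ===== SOURCE B (Python) =====
-- _IMPORT_MODE_ARG = "--import-mode=importlib"
--
-- _PYTEST_CACHE_PROVIDER_DISABLE_ARGS = ["-p", "no:cacheprovider"]
--
--
-- def _has_cache_provider_override(pytest_args):
--     return any(x == "-p" and y == "no:cacheprovider"
--                for x, y in zip(pytest_args, pytest_args[1:]))
--
--
-- def _normalized_pytest_args(pytest_args):
--     args = [str(arg) for arg in pytest_args]
--     # single boundary scan: first element that is not a flag (or end of list)
--     b = next((i for i, arg in enumerate(args) if not arg.startswith("-")), len(args))
--     inserts = []
--     if _IMPORT_MODE_ARG not in args: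
--         inserts.append(_IMPORT_MODE_ARG)
--     if not _has_cache_provider_override(args):
--         inserts.extend(_PYTEST_CACHE_PROVIDER_DISABLE_ARGS)
--     return args[:b] + inserts + args[b:]
-- ===== Notes on version B (the rewrite author's own statement) =====
-- stated objective: simpler
-- what changed: One boundary scan plus a slice-based concatenation replaces A's two conditional in-place insertions each preceded by its own boundary re-scan; the override check runs once on the original list (as zip-adjacent any) instead of on the mutated list.
-- intended difference: When '--import-mode=importlib' is absent and the first non-flag argument is 'no:cacheprovider' immediately preceded by '-p' with no further '-p no:cacheprovider' pair after it, A's first insertion splits that pair so A fails to see the user's cache-provider override and returns a list with '-p'/'no:cacheprovider' inserted a second time (and '--import-mode=importlib' placed as the argument of the user's '-p'); B detects the override on the original list and inserts only '--import-mode=importlib', which is what the override check is there for. — e.g. on _normalized_pytest_args(["-p", "no:cacheprovider"]): A returns ["-p", "--import-mode=importlib", "-p", "no:cacheprovider", "no:cacheprovider"], B returns ["-p", "--import-mode=importlib", "no:cacheprovider"]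
import Mathlib
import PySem

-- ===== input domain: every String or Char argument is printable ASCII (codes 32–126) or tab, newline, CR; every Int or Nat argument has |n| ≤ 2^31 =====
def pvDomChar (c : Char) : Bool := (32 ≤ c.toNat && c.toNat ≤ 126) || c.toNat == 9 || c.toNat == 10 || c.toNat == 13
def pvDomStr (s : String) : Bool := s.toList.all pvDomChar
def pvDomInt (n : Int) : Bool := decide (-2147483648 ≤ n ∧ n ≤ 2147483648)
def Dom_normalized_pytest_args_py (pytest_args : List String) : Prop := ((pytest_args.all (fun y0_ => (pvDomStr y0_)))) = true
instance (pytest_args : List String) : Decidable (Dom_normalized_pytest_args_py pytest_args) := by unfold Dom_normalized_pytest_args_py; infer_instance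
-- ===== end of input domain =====

-- B replaces A's two conditional in-place insertions (each with its own boundary re-scan over the
-- partially mutated list) by one boundary scan and a single slice-based concatenation; on the corner
-- inputs described at D_ below A fails to see a user's "-p no:cacheprovider" override and B inserts
-- the defaults only once (stated intended difference). Neither Python mutates its argument.

-- ===== PORT A =====
-- module constants _IMPORT_MODE_ARG and _PYTEST_CACHE_PROVIDER_DISABLE_ARGS
def pvImportModeArg : String := "--import-mode=importlib"
def pvCacheArgs : List String := ["-p", "no:cacheprovider"]

-- Python helper _has_cache_provider_override: scan for an adjacent pair "-p","no:cacheprovider"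
def pvHasCacheA : List String → Bool
  | a :: b :: rest => (a == "-p" && b == "no:cacheprovider") || pvHasCacheA (b :: rest)
  | _ => false

-- A's boundary loop: insert_at = len; for index,arg: if not arg.startswith("-"): insert_at = index; break
def pvInsertAtA : List String → Nat
  | [] => 0
  | a :: rest => if PySem.Str.startswith a "-" then pvInsertAtA rest + 1 else 0

def normalized_pytest_args_py (pytest_args : List String) : List String :=
  -- normalized_args = [str(arg) for arg in pytest_args]  (identity on a list of strings)
  let normalized := pytest_args
  -- first conditional mutation: normalized_args.insert(insert_at, _IMPORT_MODE_ARG)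
  let n1 := if pvImportModeArg ∈ normalized then normalized
            else normalized.take (pvInsertAtA normalized) ++ [pvImportModeArg]
                   ++ normalized.drop (pvInsertAtA normalized)
  -- second conditional mutation: normalized_args[insert_at:insert_at] = list(_PYTEST_CACHE_PROVIDER_DISABLE_ARGS)
  if pvHasCacheA n1 then n1
  else n1.take (pvInsertAtA n1) ++ pvCacheArgs ++ n1.drop (pvInsertAtA n1)

-- ===== PORT B =====
-- B's helper: any(x == "-p" and y == "no:cacheprovider" for x, y in zip(args, args[1:]))
def pvHasCacheB (l : List String) : Bool :=
  (l.zip l.tail).any (fun p => p.1 == "-p" && p.2 == "no:cacheprovider")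

def normalized_pytest_args_py_alt (pytest_args : List String) : List String :=
  -- b = next((i for i, arg in enumerate(args) if not arg.startswith("-")), len(args))
  let b := pytest_args.findIdx (fun a => !(PySem.Str.startswith a "-"))
  let inserts :=
    (if pvImportModeArg ∈ pytest_args then [] else [pvImportModeArg])
      ++ (if pvHasCacheB pytest_args then [] else pvCacheArgs)
  pytest_args.take b ++ inserts ++ pytest_args.drop b

-- ===== PRECONDITION & SPEC =====
-- When "--import-mode=importlib" is absent and the first non-flag argument is "no:cacheprovider"
-- immediately preceded by "-p", with no further "-p","no:cacheprovider" pair after it, A's first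
-- insertion splits that pair, so A misses the user's cache-provider override and returns a list with
-- "-p","no:cacheprovider" inserted a second time; B detects the override on the original list and
-- inserts only "--import-mode=importlib", which is what the override check is there to ensure.
def D_normalized_pytest_args_py (pytest_args : List String) : Prop :=
  pvImportModeArg ∉ pytest_args ∧
  ∃ i < pytest_args.length,
    (∀ x ∈ pytest_args.take (i + 1), PySem.Str.startswith x "-" = true) ∧
    pvCacheArgs <+: pytest_args.drop i ∧
    ¬ pvCacheArgs <:+: pytest_args.drop (i + 2)

instance (pytest_args : List String) : Decidable (D_normalized_pytest_args_py pytest_args) := by unfold D_normalized_pytest_args_py; infer_instance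

def Spec_normalized_pytest_args_py (pytest_args : List String) (out : List String) : Prop :=
  ¬ D_normalized_pytest_args_py pytest_args → out = normalized_pytest_args_py_alt pytest_args
instance (pytest_args : List String) (out : List String) : Decidable (Spec_normalized_pytest_args_py pytest_args out) := by unfold Spec_normalized_pytest_args_py; infer_instance

def pvDiffWitness_normalized_pytest_args_py : List String := ["-p", "no:cacheprovider"]
def pvDiffWitnessOut_normalized_pytest_args_py : (List String) × (List String) :=
  (["-p", "--import-mode=importlib", "-p", "no:cacheprovider", "no:cacheprovider"],
   ["-p", "--import-mode=importlib", "no:cacheprovider"])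

-- ===== CLAIM (what is proved, stated in full; the proofs are below) =====
def Claim_unchanged_normalized_pytest_args_py : Prop := ∀ (pytest_args : List String), Dom_normalized_pytest_args_py pytest_args → Spec_normalized_pytest_args_py pytest_args (normalized_pytest_args_py pytest_args)
def Claim_changed_normalized_pytest_args_py : Prop := Dom_normalized_pytest_args_py (pvDiffWitness_normalized_pytest_args_py) ∧ D_normalized_pytest_args_py (pvDiffWitness_normalized_pytest_args_py) ∧ normalized_pytest_args_py (pvDiffWitness_normalized_pytest_args_py) = pvDiffWitnessOut_normalized_pytest_args_py.1 ∧ normalized_pytest_args_py_alt (pvDiffWitness_normalized_pytest_args_py) = pvDiffWitnessOut_normalized_pytest_args_py.2 ∧ pvDiffWitnessOut_normalized_pytest_args_py.1 ≠ pvDiffWitnessOut_normalized_pytest_args_py.2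
def Claim_exact_normalized_pytest_args_py : Prop := ∀ (pytest_args : List String), Dom_normalized_pytest_args_py pytest_args → D_normalized_pytest_args_py pytest_args → normalized_pytest_args_py pytest_args ≠ normalized_pytest_args_py_alt pytest_args


-- ===== LEMMAS AND PROOFS =====

theorem pv_dash_ne_nc (x : String) (h : PySem.Str.startswith x "-" = true) :
    x ≠ "no:cacheprovider" := by
  intro hx; subst hx; exact absurd h (by decide)

theorem pv_IM_dash : PySem.Str.startswith "--import-mode=importlib" "-" = true := by decide

-- the two override scans agree
theorem pv_hasB_eq : ∀ l : List String, pvHasCacheB l = pvHasCacheA l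
  | [] => by simp [pvHasCacheB, pvHasCacheA]
  | [a] => by simp [pvHasCacheB, pvHasCacheA]
  | a :: b :: r => by
      have ih := pv_hasB_eq (b :: r)
      simp only [pvHasCacheB, List.tail_cons, List.zip_cons_cons, List.any_cons] at ih ⊢
      rw [ih]; rfl

-- A's boundary scan is findIdx of "does not start with '-'"
theorem pv_insertAt_eq_findIdx : ∀ l : List String,
    pvInsertAtA l = l.findIdx (fun a => !(PySem.Str.startswith a "-"))
  | [] => rfl
  | a :: t => by
      by_cases h : PySem.Str.startswith a "-" = true
      · simp [pvInsertAtA, List.findIdx_cons, pv_insertAt_eq_findIdx t]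
      · simp [pvInsertAtA, List.findIdx_cons, Bool.not_eq_true] at *
        simp [h]

-- boundary of a list split as all-dash prefix ++ rest with non-dash head
theorem pv_insertAt_split : ∀ (xs ys : List String),
    (∀ x ∈ xs, PySem.Str.startswith x "-" = true) →
    (∀ h, ys.head? = some h → PySem.Str.startswith h "-" = false) →
    pvInsertAtA (xs ++ ys) = xs.length
  | [], ys, _, hys => by
      cases ys with
      | nil => rfl
      | cons y t =>
        have hy : PySem.Chars.startswith y.toList ['-'] = false := by simpa using hys y rfl
        simp [pvInsertAtA, hy]
  | x :: xs, ys, hxs, hys => by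
      have hx : PySem.Chars.startswith x.toList ['-'] = true := by simpa using hxs x (by simp)
      simp [pvInsertAtA, hx,
        pv_insertAt_split xs ys (fun z hz => hxs z (by simp [hz])) hys]

-- override scan over an all-dash prefix, when the straddling pair is absent
theorem pv_hasA_split : ∀ (xs ys : List String),
    (∀ x ∈ xs, PySem.Str.startswith x "-" = true) →
    ¬(xs.getLast? = some "-p" ∧ ys.head? = some "no:cacheprovider") →
    pvHasCacheA (xs ++ ys) = pvHasCacheA ys
  | [], ys, _, _ => by simp
  | [x], ys, hxs, hS => by
      cases ys with
      | nil => simp [pvHasCacheA]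
      | cons y t =>
        have hxy : ¬(x = "-p" ∧ y = "no:cacheprovider") := by
          intro ⟨h1, h2⟩; exact hS ⟨by simp [h1], by simp [h2]⟩
        simp only [List.cons_append, List.nil_append, pvHasCacheA]
        rcases Decidable.em (x = "-p") with h1 | h1
        · rcases Decidable.em (y = "no:cacheprovider") with h2 | h2
          · exact absurd ⟨h1, h2⟩ hxy
          · simp [h2]
        · simp [h1]
  | x :: x' :: xs, ys, hxs, hS => by
      have hne : x' ≠ "no:cacheprovider" := pv_dash_ne_nc x' (hxs x' (by simp))
      have ih := pv_hasA_split (x' :: xs) ys (fun z hz => hxs z (by simp at hz; rcases hz with h | h <;> simp [h]))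
        (by rwa [List.getLast?_cons_cons] at hS)
      simp only [List.cons_append] at ih ⊢
      rw [pvHasCacheA] at *
      simp [hne, ih]

-- a straddling pair makes the override scan true
theorem pv_hasA_straddle : ∀ (xs : List String) (t : List String),
    xs.getLast? = some "-p" →
    pvHasCacheA (xs ++ "no:cacheprovider" :: t) = true
  | [], t, h => by simp at h
  | [x], t, h => by
      have hx : x = "-p" := by simpa [List.getLast?] using h
      simp [pvHasCacheA, hx]
  | x :: x' :: xs, t, h => by
      rw [List.getLast?_cons_cons] at h
      have ih := pv_hasA_straddle (x' :: xs) t h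
      simp only [List.cons_append] at ih ⊢
      rw [pvHasCacheA]
      simp [ih]

theorem pv_hasA_nc_cons : ∀ t : List String,
    pvHasCacheA ("no:cacheprovider" :: t) = pvHasCacheA t
  | [] => rfl
  | a :: r => by simp [pvHasCacheA]

-- an adjacent pair at getD-indices makes the scan true
-- a true scan yields an adjacent pair at getD-indices
-- decomposition of any list at A's boundary
theorem pv_split : ∀ l : List String, ∃ xs ys, xs ++ ys = l ∧
    (∀ x ∈ xs, PySem.Str.startswith x "-" = true) ∧
    (∀ h, ys.head? = some h → PySem.Str.startswith h "-" = false) ∧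
    xs.length = pvInsertAtA l := by
  intro l
  induction l with
  | nil => exact ⟨[], [], rfl, by simp, by simp, rfl⟩
  | cons a t ih =>
    by_cases h : PySem.Str.startswith a "-" = true
    · have ha : PySem.Chars.startswith a.toList ['-'] = true := by simpa using h
      obtain ⟨xs, ys, he, h1, h2, h3⟩ := ih
      refine ⟨a :: xs, ys, by simp [he], ?_, h2, by simp [pvInsertAtA, ha, h3]⟩
      intro x hx; rcases (by simpa using hx : x = a ∨ x ∈ xs) with rfl | hx
      · exact h
      · exact h1 x hx
    · have ha : PySem.Str.startswith a "-" = false := Bool.eq_false_iff.mpr (fun hc => h hc)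
      have ha' : PySem.Chars.startswith a.toList ['-'] = false := by simpa using ha
      exact ⟨[], a :: t, rfl, by simp, fun z hz => by simp at hz; subst hz; exact ha,
        by simp [pvInsertAtA, ha']⟩

theorem pv_drop_append (xs : List String) (ys : List String) (n : Nat) :
    (xs ++ ys).drop (xs.length + n) = ys.drop n := by
  induction xs with
  | nil => simp
  | cons a t ih => simpa [List.cons_append, Nat.succ_add] using ih

theorem pv_hasA_cons (a : String) (t : List String) (h : pvHasCacheA t = true) :
    pvHasCacheA (a :: t) = true := by
  cases t with
  | nil => simp [pvHasCacheA] at h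
  | cons b r => rw [pvHasCacheA]; simp [h]

-- the override scan finds exactly an infix occurrence of ["-p", "no:cacheprovider"]
theorem pv_hasA_infix : ∀ l : List String,
    pvHasCacheA l = true ↔ ["-p", "no:cacheprovider"] <:+: l := by
  intro l
  constructor
  · intro h
    induction l with
    | nil => simp [pvHasCacheA] at h
    | cons a t ih =>
      cases t with
      | nil => simp [pvHasCacheA] at h
      | cons b r =>
        rw [pvHasCacheA] at h
        rcases Bool.or_eq_true_iff.mp h with h | h
        · rcases Bool.and_eq_true_iff.mp h with ⟨h1, h2⟩
          rw [eq_of_beq h1, eq_of_beq h2]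
          exact ⟨[], r, by simp⟩
        · obtain ⟨s, t2, hst⟩ := ih h
          exact ⟨a :: s, t2, by simp [hst]⟩
  · intro h
    obtain ⟨u, v, huv⟩ := h
    subst huv
    induction u with
    | nil => simp [pvHasCacheA]
    | cons a u ih => exact pv_hasA_cons a _ ih

theorem pv_take_append (xs ys : List String) : (xs ++ ys).take xs.length = xs := by
  induction xs with
  | nil => simp
  | cons a t ih => simpa using ih

theorem pv_getD_append_left (xs ys : List String) (n : Nat) (d : String) (h : n < xs.length) :
    (xs ++ ys).getD n d = xs.getD n d := by
  rw [List.getD_eq_getElem?_getD, List.getD_eq_getElem?_getD, List.getElem?_append_left h]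

theorem pv_getLast?_getD (xs : List String) (v : String) (hv : v ≠ "") :
    xs.getLast? = some v ↔ (1 ≤ xs.length ∧ xs.getD (xs.length - 1) "" = v) := by
  rw [List.getLast?_eq_getElem?]
  constructor
  · intro h
    have hlen : xs ≠ [] := by rintro rfl; simp at h
    refine ⟨by cases xs with | nil => exact absurd rfl hlen | cons _ _ => simp, ?_⟩
    rw [List.getD_eq_getElem?_getD, h]; rfl
  · rintro ⟨h1, h2⟩
    rw [List.getD_eq_getElem?_getD] at h2
    cases hx : xs[xs.length - 1]? with
    | none => rw [hx] at h2; exact absurd h2.symm hv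
    | some w => rw [hx] at h2; simp at h2; rw [h2]

theorem pv_vals (xs t : List String)
    (hxs : ∀ x ∈ xs, PySem.Str.startswith x "-" = true)
    (hlast : xs.getLast? = some "-p")
    (hft : pvHasCacheA t = false)
    (hIM : ("--import-mode=importlib" : String) ∉ xs ++ "no:cacheprovider" :: t) :
    normalized_pytest_args_py (xs ++ "no:cacheprovider" :: t)
      = xs ++ "--import-mode=importlib" :: "-p" :: "no:cacheprovider" :: "no:cacheprovider" :: t ∧
    normalized_pytest_args_py_alt (xs ++ "no:cacheprovider" :: t)
      = xs ++ "--import-mode=importlib" :: "no:cacheprovider" :: t := by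
  have hys : ∀ h, (("no:cacheprovider" :: t) : List String).head? = some h →
      PySem.Str.startswith h "-" = false := by
    intro h hh; simp at hh; subst hh; decide
  have hA1 : pvInsertAtA (xs ++ "no:cacheprovider" :: t) = xs.length :=
    pv_insertAt_split xs _ hxs hys
  have hfind : (xs ++ "no:cacheprovider" :: t).findIdx (fun a => !PySem.Chars.startswith a.toList ['-'])
      = xs.length := by simpa using (pv_insertAt_eq_findIdx _).symm.trans hA1
  have htake : (xs ++ "no:cacheprovider" :: t).take xs.length = xs := pv_take_append xs _
  have hdrop : (xs ++ "no:cacheprovider" :: t).drop xs.length = "no:cacheprovider" :: t := by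
    simpa using pv_drop_append xs ("no:cacheprovider" :: t) 0
  have hxs' : ∀ x ∈ xs ++ ["--import-mode=importlib"], PySem.Str.startswith x "-" = true := by
    intro x hx
    rcases List.mem_append.mp hx with h | h
    · exact hxs x h
    · simp at h; subst h; exact pv_IM_dash
  have hA1' : pvInsertAtA (xs ++ "--import-mode=importlib" :: "no:cacheprovider" :: t)
      = xs.length + 1 := by
    have := pv_insertAt_split (xs ++ ["--import-mode=importlib"]) _ hxs' hys
    simpa using this
  have htake' : (xs ++ "--import-mode=importlib" :: "no:cacheprovider" :: t).take (xs.length + 1)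
      = xs ++ ["--import-mode=importlib"] := by
    have := pv_take_append (xs ++ ["--import-mode=importlib"]) ("no:cacheprovider" :: t)
    simpa using this
  have hdrop' : (xs ++ "--import-mode=importlib" :: "no:cacheprovider" :: t).drop (xs.length + 1)
      = "no:cacheprovider" :: t := by
    have := pv_drop_append (xs ++ ["--import-mode=importlib"]) ("no:cacheprovider" :: t) 0
    simpa using this
  have hn1 : pvHasCacheA (xs ++ "--import-mode=importlib" :: "no:cacheprovider" :: t)
      = pvHasCacheA ("no:cacheprovider" :: t) := by
    have := pv_hasA_split (xs ++ ["--import-mode=importlib"]) ("no:cacheprovider" :: t) hxs'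
      (by simp)
    simpa using this
  have hB : pvHasCacheA (xs ++ "no:cacheprovider" :: t) = true := pv_hasA_straddle xs t hlast
  constructor
  · simp [pvImportModeArg, pvCacheArgs, normalized_pytest_args_py, hIM, hA1, htake, hdrop, hn1, pv_hasA_nc_cons, hft,
      hA1', htake', hdrop']
  · simp [pvImportModeArg, pvCacheArgs, normalized_pytest_args_py_alt, hIM, hfind, htake, hdrop, pv_hasB_eq, hB]

theorem pv_main : ∀ args, ¬ D_normalized_pytest_args_py args →
    normalized_pytest_args_py args = normalized_pytest_args_py_alt args := by
  intro args hD
  obtain ⟨xs, ys, rfl, hxs, hys, hb⟩ := pv_split args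
  have hA1 : pvInsertAtA (xs ++ ys) = xs.length := hb.symm
  have hfind : (xs ++ ys).findIdx (fun a => !PySem.Chars.startswith a.toList ['-']) = xs.length := by
    simpa using (pv_insertAt_eq_findIdx _).symm.trans hA1
  have htake : (xs ++ ys).take xs.length = xs := pv_take_append xs ys
  have hdrop : (xs ++ ys).drop xs.length = ys := by simpa using pv_drop_append xs ys 0
  by_cases hIM : ("--import-mode=importlib" : String) ∈ xs ++ ys
  · by_cases hC : pvHasCacheA (xs ++ ys) = true
    · simp [pvImportModeArg, pvCacheArgs, normalized_pytest_args_py, normalized_pytest_args_py_alt, hIM, hC, hfind, hA1,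
        pv_hasB_eq, htake, hdrop]
    · simp [pvImportModeArg, pvCacheArgs, normalized_pytest_args_py, normalized_pytest_args_py_alt, hIM, hC, hfind, hA1,
        pv_hasB_eq, htake, hdrop]
  · have hxs' : ∀ x ∈ xs ++ ["--import-mode=importlib"], PySem.Str.startswith x "-" = true := by
      intro x hx
      rcases List.mem_append.mp hx with h | h
      · exact hxs x h
      · simp at h; subst h; exact pv_IM_dash
    have hA1' : pvInsertAtA (xs ++ "--import-mode=importlib" :: ys) = xs.length + 1 := by
      have := pv_insertAt_split (xs ++ ["--import-mode=importlib"]) ys hxs' hys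
      simpa using this
    have htake' : (xs ++ "--import-mode=importlib" :: ys).take (xs.length + 1)
        = xs ++ ["--import-mode=importlib"] := by
      have := pv_take_append (xs ++ ["--import-mode=importlib"]) ys
      simpa using this
    have hdrop' : (xs ++ "--import-mode=importlib" :: ys).drop (xs.length + 1) = ys := by
      have := pv_drop_append (xs ++ ["--import-mode=importlib"]) ys 0
      simpa using this
    have hn1 : pvHasCacheA (xs ++ "--import-mode=importlib" :: ys) = pvHasCacheA ys := by
      have := pv_hasA_split (xs ++ ["--import-mode=importlib"]) ys hxs' (by simp)
      simpa using this
    by_cases hS : xs.getLast? = some "-p" ∧ ys.head? = some "no:cacheprovider"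
    · obtain ⟨hS1, hS2⟩ := hS
      cases ys with
      | nil => simp at hS2
      | cons y t =>
        have hy : y = "no:cacheprovider" := by simpa using hS2
        subst hy
        have hxsne : xs ≠ [] := by rintro rfl; simp at hS1
        have hB : pvHasCacheA (xs ++ "no:cacheprovider" :: t) = true := pv_hasA_straddle xs t hS1
        have hft : pvHasCacheA t = true := by
          by_contra hft
          rw [Bool.not_eq_true] at hft
          apply hD
          unfold D_normalized_pytest_args_py
          simp only [pvImportModeArg, pvCacheArgs]
          have hdropt : (xs ++ "no:cacheprovider" :: t).drop (xs.length + 1) = t := by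
            simpa using pv_drop_append xs ("no:cacheprovider" :: t) 1
          obtain ⟨xs', rfl⟩ := List.getLast?_eq_some_iff.mp hS1
          refine ⟨hIM, xs'.length, by simp, ?_, ?_, ?_⟩
          · have htk : ((xs' ++ ["-p"]) ++ "no:cacheprovider" :: t).take (xs'.length + 1)
                = xs' ++ ["-p"] := by
              simpa using pv_take_append (xs' ++ ["-p"]) ("no:cacheprovider" :: t)
            intro x hx; rw [htk] at hx; exact hxs x hx
          · have hdp : ((xs' ++ ["-p"]) ++ "no:cacheprovider" :: t).drop xs'.length
                = "-p" :: "no:cacheprovider" :: t := by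
              simpa using pv_drop_append xs' ("-p" :: "no:cacheprovider" :: t) 0
            exact ⟨t, by simp [hdp]⟩
          · have hd : ((xs' ++ ["-p"]) ++ "no:cacheprovider" :: t).drop (xs'.length + 2) = t := by
              simpa [Nat.add_comm] using pv_drop_append xs' ("-p" :: "no:cacheprovider" :: t) 2
            rw [hd]
            intro hinf
            rw [(pv_hasA_infix t).mpr hinf] at hft
            exact absurd hft (by decide)
        simp [pvImportModeArg, pvCacheArgs, normalized_pytest_args_py, normalized_pytest_args_py_alt, hIM, hfind, hA1, htake,
          hdrop, pv_hasB_eq, hB, hn1, pv_hasA_nc_cons, hft]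
    · have hAeq : pvHasCacheA (xs ++ ys) = pvHasCacheA ys := pv_hasA_split xs ys hxs hS
      by_cases hC : pvHasCacheA ys = true
      · simp [pvImportModeArg, pvCacheArgs, normalized_pytest_args_py, normalized_pytest_args_py_alt, hIM, hfind, hA1, htake,
          hdrop, pv_hasB_eq, hAeq, hn1, hC]
      · simp [pvImportModeArg, pvCacheArgs, normalized_pytest_args_py, normalized_pytest_args_py_alt, hIM, hfind, hA1, htake,
          hdrop, htake', hdrop', hA1', pv_hasB_eq, hAeq, hn1, hC]

theorem pv_exact : ∀ args, D_normalized_pytest_args_py args →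
    normalized_pytest_args_py args ≠ normalized_pytest_args_py_alt args := by
  intro args hD
  unfold D_normalized_pytest_args_py at hD
  simp only [pvImportModeArg, pvCacheArgs] at hD
  obtain ⟨hIM, i, hilen, htki, hp, hnoinf⟩ := hD
  obtain ⟨r, hr⟩ := hp
  have hai : args[i]? = some "-p" := by
    rw [← List.head?_drop, ← hr]; rfl
  have h1 : "no:cacheprovider" :: r = args.drop (i + 1) := by
    have := congrArg (List.drop 1) hr
    simpa [List.drop_drop, Nat.add_comm] using this
  have h2 : r = args.drop (i + 2) := by
    have := congrArg (List.drop 2) hr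
    simpa [List.drop_drop, Nat.add_comm] using this
  have hysform : args.drop (i + 1) = "no:cacheprovider" :: args.drop (i + 2) := by
    rw [← h1, ← h2]
  have hsplit : args.take (i + 1) ++ args.drop (i + 1) = args := List.take_append_drop (i + 1) args
  have hxsl : (args.take (i + 1)).length = i + 1 := by simp [List.length_take]; omega
  have hlast : (args.take (i + 1)).getLast? = some "-p" := by
    apply (pv_getLast?_getD (args.take (i + 1)) "-p" (by decide)).mpr
    refine ⟨by omega, ?_⟩
    rw [hxsl]
    simp only [Nat.add_sub_cancel]
    have h3 := pv_getD_append_left (args.take (i + 1)) (args.drop (i + 1)) i "" (by omega)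
    rw [hsplit] at h3
    rw [← h3, List.getD_eq_getElem?_getD, hai]; rfl
  have hft : pvHasCacheA (args.drop (i + 2)) = false := by
    by_contra h
    rw [Bool.not_eq_false] at h
    exact hnoinf ((pv_hasA_infix _).mp h)
  have hIM' : ("--import-mode=importlib" : String) ∉
      args.take (i + 1) ++ "no:cacheprovider" :: args.drop (i + 2) := by
    rw [← hysform, hsplit]; exact hIM
  have hkey := pv_vals (args.take (i + 1)) (args.drop (i + 2)) htki hlast hft hIM'
  have hargs : args = args.take (i + 1) ++ "no:cacheprovider" :: args.drop (i + 2) := by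
    conv_lhs => rw [← hsplit, hysform]
  intro heq
  rw [hargs] at heq
  rw [hkey.1, hkey.2] at heq
  have hlen := congrArg List.length heq
  simp [List.length_append] at hlen
  omega

-- ===== VERDICT (by name: the statement is the Claim_ definition above) =====
theorem normalized_pytest_args_py_spec : Claim_unchanged_normalized_pytest_args_py := by
  intro args _ hD; exact pv_main args hD

theorem normalized_pytest_args_py_changed : Claim_changed_normalized_pytest_args_py := by
  unfold Claim_changed_normalized_pytest_args_py; decide

theorem normalized_pytest_args_py_tight : Claim_exact_normalized_pytest_args_py := by
  intro args _ hD; exact pv_exact args hD
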